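-- pv_equiv track=rewrite | github.com/Dean-Lin99/HAtools | monitor/monitor.py | is_first_column_serial
-- ===== SOURCE A (Python) =====
-- def is_nullish(v) -> bool:
--     if v is None:
--         return True
--     s = str(v).strip()
--     return s == "" or s.lower() in ("nan", "none")
--
-- def is_first_column_serial(col, min_length=5):
--     numbers = []
--     for val in col:
--         if is_nullish(val):
--             numbers.append(None)
--             continue
--         try:
--             numbers.append(int(str(val).strip()))
--         except:
--             numbers.append(None)
--     max_streak = 0
--     streak = 0
--     prev = None
--     for n in numbers:
--         if n is not None and (prev is None or n == prev + 1):
--             streak += 1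
--         else:
--             streak = 1 if n is not None else 0
--         prev = n
--         max_streak = max(max_streak, streak)
--     return max_streak >= min_length
-- ===== SOURCE B (Python) =====
-- def is_nullish(v) -> bool:
--     if v is None:
--         return True
--     s = str(v).strip()
--     return s == "" or s.lower() in ("nan", "none")
--
-- def _parse(val):
--     if is_nullish(val):
--         return None
--     try:
--         return int(str(val).strip())
--     except:
--         return None
--
-- def is_first_column_serial(col, min_length=5):
--     nums = [_parse(v) for v in col]
--     # split into maximal contiguous segments of parsed integers
--     segs = []
--     cur = []
--     for x in nums:
--         if x is None:
--             if cur: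
--                 segs.append(cur)
--                 cur = []
--         else:
--             cur.append(x)
--     if cur:
--         segs.append(cur)
--     # longest +1-consecutive subrun over all segments
--     best = 0
--     for seg in segs:
--         run = 1
--         best = max(best, 1)
--         prev = seg[0]
--         for x in seg[1:]:
--             run = run + 1 if x == prev + 1 else 1
--             best = max(best, run)
--             prev = x
--     return best >= min_length
-- ===== Notes on version B (the rewrite author's own statement) =====
-- stated objective: alternative
-- what changed: B replaces A's single stateful streak/prev scan with a different decomposition: parse the column, split it into maximal contiguous integer segments at each null, scan each segment for its longest +1-consecutive subrun, and compare the maximum with min_length.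
import Mathlib
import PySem

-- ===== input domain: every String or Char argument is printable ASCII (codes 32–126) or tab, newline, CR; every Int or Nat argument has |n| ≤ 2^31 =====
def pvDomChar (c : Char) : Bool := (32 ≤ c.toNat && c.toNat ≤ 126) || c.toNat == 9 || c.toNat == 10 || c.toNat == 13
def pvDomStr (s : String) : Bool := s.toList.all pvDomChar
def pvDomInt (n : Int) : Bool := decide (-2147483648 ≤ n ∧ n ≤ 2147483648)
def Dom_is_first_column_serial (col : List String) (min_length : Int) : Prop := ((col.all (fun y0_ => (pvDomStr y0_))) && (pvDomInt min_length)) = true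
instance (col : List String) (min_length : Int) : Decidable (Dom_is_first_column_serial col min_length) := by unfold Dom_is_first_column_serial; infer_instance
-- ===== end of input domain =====

-- B trades A's single stateful streak/prev scan for a split-into-segments-then-scan decomposition; same cost, proved to return the same Bool on every input.

-- ===== PORT A =====
-- is_nullish(v) for a string v: str(v) = v; membership test written out over the two literals
def is_nullish (v : String) : Bool :=
  let s := PySem.Str.strip v
  s == "" || (PySem.Str.lower s == "nan" || PySem.Str.lower s == "none")

-- the body of A's second loop (streak-update, then prev := n, then max_streak update)
def pvAStep (t : Int × Int × Option Int) (n : Option Int) : Int × Int × Option Int :=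
  let streak' :=
    match n, t.2.2 with
    | some _, none => t.2.1 + 1          -- n not None, prev is None
    | some x, some p => if x = p + 1 then t.2.1 + 1 else 1
    | none, _ => 0
  (max t.1 streak', streak', n)

def is_first_column_serial (col : List String) (min_length : Int) : Bool :=
  -- first loop: build `numbers`; int(str(val).strip()) raising -> append None (bare except)
  let numbers : List (Option Int) :=
    col.foldl (fun acc val =>
      if is_nullish val then acc ++ [none]
      else acc ++ [PySem.Int.ofStr? (PySem.Str.strip val)]) []
  -- second loop: state (max_streak, streak, prev)
  let st := numbers.foldl pvAStep (0, 0, none)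
  decide (min_length ≤ st.1)

-- ===== PORT B =====
def pvParse (val : String) : Option Int :=
  if is_nullish val then none else PySem.Int.ofStr? (PySem.Str.strip val)

-- split the parsed column into maximal contiguous segments of integers (accumulator = current segment)
def pvSegments : List (Option Int) → List Int → List (List Int)
  | [], cur => if cur.isEmpty then [] else [cur]
  | none :: rest, cur => if cur.isEmpty then pvSegments rest [] else cur :: pvSegments rest []
  | some x :: rest, cur => pvSegments rest (cur ++ [x])

-- inner loop over seg[1:] with prev carried along
def pvSegScan : Int → List Int → Int → Int → Int
  | _, [], _, best => best
  | prev, x :: rest, run, best =>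
    let run' := if x = prev + 1 then run + 1 else 1
    pvSegScan x rest run' (max best run')

-- fold one segment into the running best (segments produced by pvSegments are nonempty)
def pvSegBest (seg : List Int) (best : Int) : Int :=
  match seg with
  | [] => best
  | x :: rest => pvSegScan x rest 1 (max best 1)

def is_first_column_serial_alt (col : List String) (min_length : Int) : Bool :=
  let nums := col.map pvParse
  let segs := pvSegments nums []
  let best := segs.foldl (fun b seg => pvSegBest seg b) 0
  decide (min_length ≤ best)

-- ===== PRECONDITION & SPEC =====
def Spec_is_first_column_serial (col : List String) (min_length : Int) (out : Bool) : Prop := out = is_first_column_serial_alt col min_length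
instance (col : List String) (min_length : Int) (out : Bool) : Decidable (Spec_is_first_column_serial col min_length out) := by unfold Spec_is_first_column_serial; infer_instance

-- ===== CLAIM (what is proved, stated in full; the proofs are below) =====
def Claim_equal_is_first_column_serial : Prop := ∀ (col : List String) (min_length : Int), Dom_is_first_column_serial col min_length → Spec_is_first_column_serial col min_length (is_first_column_serial col min_length)

-- ===== LEMMAS AND PROOFS =====

-- A's second loop as structural recursion (state m = max_streak, s = streak, prev)
def pvALoop : List (Option Int) → Int → Int → Option Int → Int
  | [], m, _, _ => m
  | n :: rest, m, s, prev =>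
    let s' :=
      match n, prev with
      | some _, none => s + 1
      | some x, some p => if x = p + 1 then s + 1 else 1
      | none, _ => 0
    pvALoop rest (max m s') s' n

-- B's segments-then-scan, fused into one recursion (state cur = open segment, b = best over closed segments)
def pvBLoop : List (Option Int) → List Int → Int → Int
  | [], cur, b => if cur.isEmpty then b else pvSegBest cur b
  | none :: rest, cur, b => if cur.isEmpty then pvBLoop rest [] b else pvBLoop rest [] (pvSegBest cur b)
  | some x :: rest, cur, b => pvBLoop rest (cur ++ [x]) b

lemma pvGetLast_cons (y : Int) (restc : List Int) :
    (y :: restc).getLast? = some (restc.getLastD y) := by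
  induction restc generalizing y with
  | nil => rfl
  | cons z r ih => rw [List.getLastD_cons, ← ih z]; rfl

-- proof-side scan that also returns the final run length
def pvScan2 : Int → List Int → Int → Int → Int × Int
  | _, [], run, best => (run, best)
  | prev, x :: rest, run, best =>
    let run' := if x = prev + 1 then run + 1 else 1
    pvScan2 x rest run' (max best run')

-- (run ending at the last element, best run) within a (possibly empty) segment
def pvScanFull : List Int → Int × Int
  | [] => (0, 0)
  | x :: rest => pvScan2 x rest 1 1

lemma pvSegScan_eq_scan2 : ∀ (l : List Int) (p run best : Int),
    pvSegScan p l run best = (pvScan2 p l run best).2 := by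
  intro l
  induction l with
  | nil => intro p run best; simp [pvSegScan, pvScan2]
  | cons x rest ih => intro p run best; simp [pvSegScan, pvScan2, ih]

lemma pvScan2_max : ∀ (l : List Int) (p run b1 b2 : Int),
    (pvScan2 p l run (max b1 b2)).2 = max b1 (pvScan2 p l run b2).2 := by
  intro l
  induction l with
  | nil => intro p run b1 b2; simp [pvScan2]
  | cons x rest ih =>
    intro p run b1 b2
    simp only [pvScan2]
    rw [max_assoc, ih]

-- pvSegBest extends the running best by the best run inside the segment
lemma pvSegBest_eq (seg : List Int) (b : Int) (hne : seg ≠ []) :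
    pvSegBest seg b = max b (pvScanFull seg).2 := by
  cases seg with
  | nil => exact absurd rfl hne
  | cons x rest =>
    simp only [pvSegBest, pvScanFull, pvSegScan_eq_scan2]
    exact pvScan2_max rest x 1 b 1

-- appending one element to a scanned segment
lemma pvScan2_append : ∀ (l : List Int) (p run best x : Int),
    pvScan2 p (l ++ [x]) run best =
      (let r' := if x = l.getLastD p + 1 then (pvScan2 p l run best).1 + 1 else 1
       (r', max (pvScan2 p l run best).2 r')) := by
  intro l
  induction l with
  | nil => intro p run best x; simp [pvScan2]
  | cons y rest ih =>
    intro p run best x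
    simp only [List.cons_append, pvScan2, List.getLastD_cons]
    rw [ih]

-- the coupling invariant: A's state (m, s, prev=cur.getLast?) against B's state (cur, b)
lemma pvMain : ∀ (nums : List (Option Int)) (cur : List Int) (b m s : Int),
    0 ≤ b →
    s = (pvScanFull cur).1 →
    m = max b (pvScanFull cur).2 →
    pvALoop nums m s cur.getLast? = pvBLoop nums cur b := by
  intro nums
  induction nums with
  | nil =>
    intro cur b m s hb hs hm
    cases cur with
    | nil => simp [pvALoop, pvBLoop, pvScanFull] at *; omega
    | cons y rest =>
      simp only [pvALoop, pvBLoop, List.isEmpty_cons, Bool.false_eq_true, if_false]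
      rw [pvSegBest_eq _ _ (by simp), ← hm]
  | cons n rest ih =>
    intro cur b m s hb hs hm
    have hm0 : 0 ≤ m := le_trans hb (by rw [hm]; exact le_max_left _ _)
    cases n with
    | none =>
      cases cur with
      | nil =>
        simp only [pvALoop, pvBLoop, List.isEmpty_nil, if_true]
        have : max m 0 = m := by omega
        rw [this]
        have hmb : m = b := by simp [pvScanFull] at hm; omega
        rw [hmb]
        have := ih [] b b 0 hb (by simp [pvScanFull]) (by simp [pvScanFull]; omega)
        simpa using this
      | cons y restc =>
        simp only [pvALoop, pvBLoop, List.isEmpty_cons, Bool.false_eq_true, if_false]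
        have : max m 0 = m := by omega
        rw [this]
        rw [pvSegBest_eq _ _ (by simp), ← hm]
        have := ih [] m m 0 hm0 (by simp [pvScanFull]) (by simp [pvScanFull]; omega)
        simpa using this
    | some x =>
      cases cur with
      | nil =>
        simp only [pvALoop, pvBLoop, List.getLast?_nil]
        have hs1 : s = 0 := by simpa [pvScanFull] using hs
        have hmb : m = b := by simp [pvScanFull] at hm; omega
        rw [hs1, hmb, zero_add]
        have := ih [x] b (max b 1) 1 hb (by simp [pvScanFull, pvScan2])
          (by simp [pvScanFull, pvScan2])
        simpa using this
      | cons y restc =>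
        simp only [pvALoop, pvBLoop, pvGetLast_cons]
        set r' : Int := if x = restc.getLastD y + 1 then s + 1 else 1 with hr'
        have hfull : pvScanFull ((y :: restc) ++ [x]) =
            (r', max (pvScanFull (y :: restc)).2 r') := by
          simp only [pvScanFull, List.cons_append]
          rw [pvScan2_append]
          simp only [hr', hs, pvScanFull]
        have := ih ((y :: restc) ++ [x]) b (max m r') r' hb
          (by rw [hfull])
          (by rw [hfull, hm]; simp [max_assoc])
        have hg : (y :: restc ++ [x]).getLast? = some x := by
          exact List.getLast?_concat ..
        rw [hg] at this
        exact this

-- A's foldl equals pvALoop (first components)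
lemma pvAFold_eq : ∀ (nums : List (Option Int)) (m s : Int) (prev : Option Int),
    (nums.foldl pvAStep (m, s, prev)).1 = pvALoop nums m s prev := by
  intro nums
  induction nums with
  | nil => intro m s prev; simp [pvALoop]
  | cons n rest ih =>
    intro m s prev
    simp only [List.foldl_cons, pvALoop]
    rw [← ih]
    rfl

-- B's fold over the produced segments equals pvBLoop
lemma pvBFold_eq : ∀ (nums : List (Option Int)) (cur : List Int) (b : Int),
    (pvSegments nums cur).foldl (fun bb seg => pvSegBest seg bb) b = pvBLoop nums cur b := by
  intro nums
  induction nums with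
  | nil =>
    intro cur b
    cases cur <;> simp [pvSegments, pvBLoop]
  | cons n rest ih =>
    intro cur b
    cases n with
    | none =>
      cases cur with
      | nil => simp only [pvSegments, pvBLoop, List.isEmpty_nil, if_true]; exact ih ..
      | cons y restc =>
        simp only [pvSegments, pvBLoop, List.isEmpty_cons, Bool.false_eq_true, if_false, List.foldl_cons]
        exact ih ..
    | some x => simp only [pvSegments, pvBLoop]; exact ih ..

-- A's first loop builds exactly col.map pvParse
lemma pvNumbers_eq (col : List String) :
    col.foldl (fun acc val =>
      if is_nullish val then acc ++ [none]
      else acc ++ [PySem.Int.ofStr? (PySem.Str.strip val)]) [] = col.map pvParse := by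
  have hf : (fun (acc : List (Option Int)) val =>
      if is_nullish val then acc ++ [none]
      else acc ++ [PySem.Int.ofStr? (PySem.Str.strip val)]) =
      fun acc val => acc ++ [pvParse val] := by
    funext acc val
    unfold pvParse
    split <;> rfl
  rw [hf, PySem.List.foldl_append_singleton_eq_map]
  simp

-- ===== VERDICT (by name: the statement is the Claim_ definition above) =====
theorem is_first_column_serial_spec : Claim_equal_is_first_column_serial := by
  intro col min_length _
  unfold Spec_is_first_column_serial is_first_column_serial is_first_column_serial_alt
  rw [pvNumbers_eq]
  show decide (min_length ≤ ((col.map pvParse).foldl pvAStep (0, 0, none)).1)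
     = decide (min_length ≤ (pvSegments (col.map pvParse) []).foldl (fun b seg => pvSegBest seg b) 0)
  rw [pvAFold_eq, pvBFold_eq]
  have h := pvMain (col.map pvParse) [] 0 0 0 le_rfl (by simp [pvScanFull]) (by simp [pvScanFull])
  simp only [List.getLast?_nil] at h
  rw [h]
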